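-- pv_equiv track=rewrite | github.com/pbmartins/IIA | L_01/G_02/g02.py | remove_count
-- ===== SOURCE A (Python) =====
-- def remove_count(lst, elem):
--     if lst == []:
--         return [], 0
--     l, count = remove_count(lst[1:], elem)
--     if lst[0] == elem:
--         count += 1
--     else:
--         l = [lst[0]] + l
--     return l, count
-- ===== SOURCE B (Python) =====
-- def remove_count(lst, elem):
--     result = []
--     count = 0
--     for x in lst:
--         if x == elem:
--             count += 1
--         else:
--             result.append(x)
--     return result, count
-- ===== Notes on version B (the rewrite author's own statement) =====
-- stated objective: simpler
-- what changed: Replaces the structural recursion with repeated list concatenation by a single forward loop carrying a result accumulator and a counter.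
import Mathlib
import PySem

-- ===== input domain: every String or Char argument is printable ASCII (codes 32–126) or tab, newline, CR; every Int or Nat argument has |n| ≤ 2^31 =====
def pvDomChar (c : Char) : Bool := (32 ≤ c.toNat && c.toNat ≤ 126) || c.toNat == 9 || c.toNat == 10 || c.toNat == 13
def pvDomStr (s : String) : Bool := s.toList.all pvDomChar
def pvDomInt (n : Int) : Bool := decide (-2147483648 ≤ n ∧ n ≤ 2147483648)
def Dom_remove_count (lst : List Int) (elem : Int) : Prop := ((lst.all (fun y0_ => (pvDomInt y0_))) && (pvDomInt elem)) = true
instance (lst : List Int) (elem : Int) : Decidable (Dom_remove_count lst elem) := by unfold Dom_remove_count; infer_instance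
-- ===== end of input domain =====

-- B replaces A's structural recursion (which rebuilds the list by [x] ++ l at each level)
-- by one forward loop with a result accumulator and a counter; simpler and linear.

-- ===== PORT A =====
-- literal port of A's recursion on lst
def remove_count (lst : List Int) (elem : Int) : List Int × Int :=
  match lst with
  | [] => ([], 0)
  | x :: rest =>
    let p := remove_count rest elem
    if x == elem then (p.1, p.2 + 1)
    else ([x] ++ p.1, p.2)

-- ===== PORT B =====
-- loop over lst carrying (result, count); result.append x ported as result ++ [x]
def remove_count_alt (lst : List Int) (elem : Int) : List Int × Int :=
  lst.foldl (fun acc x => if x == elem then (acc.1, acc.2 + 1) else (acc.1 ++ [x], acc.2)) ([], 0)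

-- ===== PRECONDITION & SPEC =====
def Spec_remove_count (lst : List Int) (elem : Int) (out : List Int × Int) : Prop := out = remove_count_alt lst elem
instance (lst : List Int) (elem : Int) (out : List Int × Int) : Decidable (Spec_remove_count lst elem out) := by unfold Spec_remove_count; infer_instance

-- ===== CLAIM (what is proved, stated in full; the proofs are below) =====
def Claim_equal_remove_count : Prop := ∀ (lst : List Int) (elem : Int), Dom_remove_count lst elem → Spec_remove_count lst elem (remove_count lst elem)

-- ===== LEMMAS AND PROOFS =====

-- loop invariant: folding from an arbitrary accumulator prepends it
theorem remove_count_alt_general (lst : List Int) (elem : Int) (r : List Int) (c : Int) :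
    lst.foldl (fun acc x => if x == elem then (acc.1, acc.2 + 1) else (acc.1 ++ [x], acc.2)) (r, c)
      = (r ++ (remove_count lst elem).1, c + (remove_count lst elem).2) := by
  induction lst generalizing r c with
  | nil => simp [remove_count]
  | cons x rest ih =>
    rw [List.foldl_cons]
    by_cases h : (x == elem) = true
    · rw [if_pos h, ih]
      simp [remove_count, h]
      ring
    · rw [if_neg h, ih]
      simp [remove_count, h]

-- ===== VERDICT (by name: the statement is the Claim_ definition above) =====
theorem remove_count_spec : Claim_equal_remove_count := by
  intro lst elem _
  unfold Spec_remove_count remove_count_alt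
  rw [remove_count_alt_general]
  simp
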